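-- pv_equiv track=rewrite | github.com/zizouvb/codewars | 6kyu/grocer_grouping.py | group_groceries
-- ===== SOURCE A (Python) =====
-- def group_groceries(groceries):
--     sorted_groceries = {"fruit":[], "meat":[], "other":[],"vegetable":[]}
--     for item in groceries.split(","):
--         category,name=item.split("_")
--         if category in sorted_groceries:
--             sorted_groceries[category].append(name)
--         else:
--             sorted_groceries["other"].append(name)
--     for category in sorted_groceries:
--         sorted_groceries[category]=",".join(sorted(sorted_groceries[category]))
--     return "\n".join([category+":"+list for category,list in sorted_groceries.items()])
-- ===== SOURCE B (Python) =====
-- def group_groceries(groceries):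
--     pairs = []
--     for item in groceries.split(","):
--         category, name = item.split("_")
--         pairs.append((category, name))
--     known = ["fruit", "meat", "vegetable"]
--     lines = []
--     for cat in ["fruit", "meat", "other", "vegetable"]:
--         if cat == "other":
--             names = [n for c, n in pairs if c not in known]
--         else:
--             names = [n for c, n in pairs if c == cat]
--         lines.append(cat + ":" + ",".join(sorted(names)))
--     return "\n".join(lines)
-- ===== Notes on version B (the rewrite author's own statement) =====
-- stated objective: simpler
-- what changed: Replaces A's mutable dict-of-buckets built in one grouping pass with a flat (category,name) pair list and four independent filter passes, one per output line.
import Mathlib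
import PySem

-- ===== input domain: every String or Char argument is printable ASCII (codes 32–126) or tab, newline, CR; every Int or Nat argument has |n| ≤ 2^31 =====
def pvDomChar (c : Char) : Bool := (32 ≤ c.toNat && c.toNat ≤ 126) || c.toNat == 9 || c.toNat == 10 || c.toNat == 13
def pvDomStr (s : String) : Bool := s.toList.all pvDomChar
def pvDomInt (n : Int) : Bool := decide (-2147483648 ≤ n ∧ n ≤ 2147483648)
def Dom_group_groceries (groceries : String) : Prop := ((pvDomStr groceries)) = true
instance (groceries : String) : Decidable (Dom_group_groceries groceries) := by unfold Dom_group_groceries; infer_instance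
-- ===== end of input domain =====

-- B replaces A's single mutable-dict grouping pass with a flat (category,name) pair list and
-- four independent per-category filter passes (objective: simpler decomposition, same cost).

-- shared port of the Python line `category, name = item.split("_")`:
-- some (category, name) iff the split has exactly two parts, none = ValueError
def pvUnpack2 (item : String) : Option (String × String) :=
  match PySem.Str.split? item "_" with
  | some [c, n] => some (c, n)
  | _ => none

-- ===== PORT A =====
-- one step of A's grouping loop over the dict of buckets (none = ValueError, outside Pre_)
def pvBucket (d : PySem.Dict String (List String)) (item : String) :
    Option (PySem.Dict String (List String)) :=
  (pvUnpack2 item).map (fun cn =>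
    if d.contains cn.1 then d.modify cn.1 [] (· ++ [cn.2])
    else d.modify "other" [] (· ++ [cn.2]))

def group_groceries (groceries : String) : String :=
  match ((PySem.Str.split? groceries ",").getD []).foldl
      (fun acc item => acc.bind (fun d => pvBucket d item))
      (some ((((PySem.Dict.empty.insert "fruit" []).insert "meat" []).insert "other" []).insert "vegetable" [])) with
  | none => ""  -- ValueError path (excluded by Pre_)
  | some d =>
    -- second loop (each value replaced in place by ",".join(sorted(value))), then the final
    -- join; category+":"+list ported as join "" [category, ":", list] (kernel-transparent concat)
    PySem.Str.join "\n"
      ((d.items.map (fun p => (p.1, PySem.Str.join "," (PySem.List.sorted p.2 (fun x => x) false)))).map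
        (fun p => PySem.Str.join "" [p.1, ":", p.2]))

-- ===== PORT B =====
-- the pair-list building loop of Source B (none = ValueError, outside Pre_)
def pvPairs (groceries : String) : Option (List (String × String)) :=
  ((PySem.Str.split? groceries ",").getD []).foldl
    (fun acc item => acc.bind (fun ps => (pvUnpack2 item).map (fun cn => ps ++ [cn])))
    (some [])

-- one line of Source B's output: filter the pair list for this category, sort, join
def pvLine (pairs : List (String × String)) (cat : String) : String :=
  let names :=
    if cat == "other" then
      (pairs.filter (fun p => !(["fruit", "meat", "vegetable"].contains p.1))).map Prod.snd
    else (pairs.filter (fun p => p.1 == cat)).map Prod.snd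
  PySem.Str.join "" [cat, ":", PySem.Str.join "," (PySem.List.sorted names (fun x => x) false)]

def group_groceries_alt (groceries : String) : String :=
  match pvPairs groceries with
  | none => ""  -- ValueError path (excluded by Pre_)
  | some pairs => PySem.Str.join "\n" (["fruit", "meat", "other", "vegetable"].map (pvLine pairs))

-- ===== PRECONDITION & SPEC =====
-- Pre_ excludes exactly the inputs where A raises ValueError: some comma token does not split
-- into exactly two parts on "_" (both programs raise there, e.g. on the empty string).
def Pre_group_groceries (groceries : String) : Prop :=
  ∀ item ∈ (PySem.Str.split? groceries ",").getD [],
    ((PySem.Str.split? item "_").getD []).length = 2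

instance (groceries : String) : Decidable (Pre_group_groceries groceries) := by
  unfold Pre_group_groceries; infer_instance

def pvWitness_group_groceries : String := "fruit_apple,zz_salt,fruit_Pear"

def Spec_group_groceries (groceries : String) (out : String) : Prop := out = group_groceries_alt groceries
instance (groceries : String) (out : String) : Decidable (Spec_group_groceries groceries out) := by unfold Spec_group_groceries; infer_instance

-- ===== CLAIM (what is proved, stated in full; the proofs are below) =====
def Claim_equal_group_groceries : Prop := ∀ (groceries : String), Dom_group_groceries groceries → Pre_group_groceries groceries → Spec_group_groceries groceries (group_groceries groceries)

-- ===== LEMMAS AND PROOFS =====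

-- A's 4-bucket dict with explicit bucket contents
def mk4 (f m o v : List String) : PySem.Dict String (List String) :=
  ⟨[("fruit", f), ("meat", m), ("other", o), ("vegetable", v)]⟩

-- names of a given known category, in input order (syntactically B's filter)
def pvNames (qs : List (String × String)) (cat : String) : List String :=
  (qs.filter (fun p => p.1 == cat)).map Prod.snd

def pvOther (qs : List (String × String)) : List String :=
  (qs.filter (fun p => !(["fruit", "meat", "vegetable"].contains p.1))).map Prod.snd

-- unpack every item, none if any fails
def pvSplitAll (L : List String) : Option (List (String × String)) :=
  match L with
  | [] => some []
  | item :: rest => (pvUnpack2 item).bind (fun cn => (pvSplitAll rest).map (cn :: ·))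

lemma init_eq_mk4 :
    (((PySem.Dict.empty.insert "fruit" []).insert "meat" []).insert "other" []).insert "vegetable" ([] : List String)
      = mk4 [] [] [] [] := by decide

lemma bucket_mk4 (f m o v : List String) (item : String) :
    pvBucket (mk4 f m o v) item =
      (pvUnpack2 item).map (fun cn =>
        if cn.1 = "fruit" then mk4 (f ++ [cn.2]) m o v
        else if cn.1 = "meat" then mk4 f (m ++ [cn.2]) o v
        else if cn.1 = "vegetable" then mk4 f m o (v ++ [cn.2])
        else mk4 f m (o ++ [cn.2]) v) := by
  unfold pvBucket
  cases h : pvUnpack2 item with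
  | none => rfl
  | some cn =>
    obtain ⟨c, n⟩ := cn
    simp only [Option.map_some]
    by_cases hf : c = "fruit"
    · subst hf; rfl
    by_cases hm : c = "meat"
    · subst hm; rfl
    by_cases hv : c = "vegetable"
    · subst hv; rfl
    by_cases ho : c = "other"
    · subst ho; rfl
    · have hcont : (mk4 f m o v).contains c = false := by
        simp [mk4, PySem.Dict.contains, Ne.symm hf, Ne.symm hm, Ne.symm hv, Ne.symm ho]
      simp only [if_neg hf, if_neg hm, if_neg hv, hcont, Bool.false_eq_true, if_false]
      rfl

-- a fold whose step is a bind stays none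
lemma foldl_bind_none {α β : Type} (L : List α) (g : β → α → Option β) :
    L.foldl (fun acc item => acc.bind (fun d => g d item)) none = none := by
  induction L with
  | nil => rfl
  | cons a t ih => simpa using ih

lemma pvNames_cons (c n : String) (qs : List (String × String)) (cat : String) :
    pvNames ((c, n) :: qs) cat = (if c = cat then [n] else []) ++ pvNames qs cat := by
  by_cases h : c = cat <;> simp [pvNames, h]

lemma pvOther_cons (c n : String) (qs : List (String × String)) :
    pvOther ((c, n) :: qs) =
      (if c = "fruit" ∨ c = "meat" ∨ c = "vegetable" then [] else [n]) ++ pvOther qs := by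
  simp only [pvOther, List.filter_cons]
  by_cases h : c = "fruit" ∨ c = "meat" ∨ c = "vegetable"
  · rcases h with h | h | h <;> subst h <;> simp
  · have h1 : c ≠ "fruit" := fun e => h (Or.inl e)
    have h2 : c ≠ "meat" := fun e => h (Or.inr (Or.inl e))
    have h3 : c ≠ "vegetable" := fun e => h (Or.inr (Or.inr e))
    simp [h1, h2, h3]

-- A's fold over items, tracked against pvSplitAll
lemma foldA_eq (L : List String) (f m o v : List String) :
    L.foldl (fun acc item => acc.bind (fun d => pvBucket d item)) (some (mk4 f m o v)) =
      (pvSplitAll L).map (fun qs =>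
        mk4 (f ++ pvNames qs "fruit") (m ++ pvNames qs "meat")
            (o ++ pvOther qs) (v ++ pvNames qs "vegetable")) := by
  induction L generalizing f m o v with
  | nil => simp [pvSplitAll, pvNames, pvOther]
  | cons item rest ih =>
    simp only [List.foldl_cons, Option.bind_some, pvSplitAll]
    rw [bucket_mk4]
    cases h : pvUnpack2 item with
    | none => simp [foldl_bind_none]
    | some cn =>
      obtain ⟨c, n⟩ := cn
      simp only [Option.map_some, Option.bind_some]
      split_ifs with hf hm hv
      · subst hf; rw [ih]
        cases pvSplitAll rest <;>
          simp [pvNames_cons, pvOther_cons, List.append_assoc]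
      · subst hm; rw [ih]
        cases pvSplitAll rest <;>
          simp [pvNames_cons, pvOther_cons, List.append_assoc]
      · subst hv; rw [ih]
        cases pvSplitAll rest <;>
          simp [pvNames_cons, pvOther_cons, List.append_assoc]
      · rw [ih]
        cases pvSplitAll rest <;>
          simp [pvNames_cons, pvOther_cons, List.append_assoc, hf, hm, hv]

-- B's fold over items, tracked against pvSplitAll
lemma foldB_eq (L : List String) (ps : List (String × String)) :
    L.foldl (fun acc item => acc.bind (fun ps => (pvUnpack2 item).map (fun cn => ps ++ [cn])))
        (some ps) = (pvSplitAll L).map (ps ++ ·) := by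
  induction L generalizing ps with
  | nil => simp [pvSplitAll]
  | cons item rest ih =>
    simp only [List.foldl_cons, Option.bind_some, pvSplitAll]
    cases h : pvUnpack2 item with
    | none => simp [foldl_bind_none (g := fun ps item => (pvUnpack2 item).map (fun cn => ps ++ [cn]))]
    | some cn => simp [ih, Option.map_map, Function.comp_def]

-- "_" is a nonempty separator, so split never raises
lemma split_us_some (s : String) :
    PySem.Str.split? s "_" = some ((PySem.Str.split? s "_").getD []) := by
  cases h : PySem.Str.split? s "_" with
  | none => exact absurd h (Option.isSome_iff_ne_none.mp rfl)
  | some l => rfl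

-- under Pre_, every item unpacks, so pvSplitAll succeeds
lemma splitAll_some (L : List String)
    (h : ∀ item ∈ L, ((PySem.Str.split? item "_").getD []).length = 2) :
    pvSplitAll L = some ((pvSplitAll L).getD []) := by
  induction L with
  | nil => rfl
  | cons item rest ih =>
    have h2 := h item (by simp)
    have hrest := ih (fun i hi => h i (by simp [hi]))
    have hu : ∃ cn, pvUnpack2 item = some cn := by
      unfold pvUnpack2
      rw [split_us_some item]
      match hl : (PySem.Str.split? item "_").getD [] with
      | [a, b] => exact ⟨(a, b), rfl⟩
      | [] => rw [hl] at h2; simp at h2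
      | [a] => rw [hl] at h2; simp at h2
      | a :: b :: c :: t => rw [hl] at h2; simp at h2
    obtain ⟨cn, hcn⟩ := hu
    simp only [pvSplitAll, hcn, Option.bind_some]
    rw [hrest]
    rfl

-- ===== VERDICT (by name: the statement is the Claim_ definition above) =====
theorem group_groceries_spec : Claim_equal_group_groceries := by
  intro groceries _ hpre
  unfold Spec_group_groceries group_groceries group_groceries_alt pvPairs
  have hall : pvSplitAll ((PySem.Str.split? groceries ",").getD []) =
      some ((pvSplitAll ((PySem.Str.split? groceries ",").getD [])).getD []) :=
    splitAll_some _ hpre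
  rw [init_eq_mk4, foldA_eq, foldB_eq, hall]
  simp only [Option.map_some, List.nil_append]
  rfl
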